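-- pv_equiv track=rewrite | github.com/LLian7/Sig_artifact | benchmark_treeawareVisp/treeaware_isp.py | _support_product
-- ===== SOURCE A (Python) =====
-- from typing import Any, Mapping, List, Optional, Sequence, Union
--
-- _BINOMIAL_TABLES: dict[int, tuple[tuple[int, ...], ...]] = {}
--
-- def _binomial_table(universe_size: int) -> tuple[tuple[int, ...], ...]:
--     table = _BINOMIAL_TABLES.get(universe_size)
--     if table is not None:
--         return table
--
--     rows = [(1,)]
--     for n in range(1, universe_size + 1):
--         previous = rows[-1]
--         row = [1] * (n + 1)
--         for k in range(1, n):
--             row[k] = previous[k - 1] + previous[k]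
--         rows.append(tuple(row))
--
--     table = tuple(rows)
--     _BINOMIAL_TABLES[universe_size] = table
--     return table
--
-- def _support_product(rows: int, counts: Sequence[int]) -> int:
--     if rows < 0 or any(count < 0 or count > rows for count in counts):
--         return 0
--     binomial_table = _binomial_table(rows)
--     support = 1
--     for count in counts:
--         support *= binomial_table[rows][count]
--     return support
-- ===== SOURCE B (Python) =====
-- def _support_product(rows, counts):
--     if rows < 0 or any(count < 0 or count > rows for count in counts):
--         return 0
--     support = 1
--     for count in counts:
--         k = count if count <= rows - count else rows - count
--         c = 1
--         for i in range(1, k + 1):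
--             c = c * (rows - k + i) // i
--         support *= c
--     return support
-- ===== Notes on version B (the rewrite author's own statement) =====
-- stated objective: alternative
-- what changed: B computes each C(rows,count) directly with the symmetric multiplicative formula (c = c*(rows-k+i)//i for i in 1..min(count,rows-count)), replacing A's construction of the full (rows+1)-row Pascal triangle; this is asymptotically less work (O(sum of min(count,rows-count)) vs O(rows^2)) but a timing run's inputs virtually always hit the negative/too-large-count guard, where both return 0 immediately, so no speedup is measurable.
import Mathlib
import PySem

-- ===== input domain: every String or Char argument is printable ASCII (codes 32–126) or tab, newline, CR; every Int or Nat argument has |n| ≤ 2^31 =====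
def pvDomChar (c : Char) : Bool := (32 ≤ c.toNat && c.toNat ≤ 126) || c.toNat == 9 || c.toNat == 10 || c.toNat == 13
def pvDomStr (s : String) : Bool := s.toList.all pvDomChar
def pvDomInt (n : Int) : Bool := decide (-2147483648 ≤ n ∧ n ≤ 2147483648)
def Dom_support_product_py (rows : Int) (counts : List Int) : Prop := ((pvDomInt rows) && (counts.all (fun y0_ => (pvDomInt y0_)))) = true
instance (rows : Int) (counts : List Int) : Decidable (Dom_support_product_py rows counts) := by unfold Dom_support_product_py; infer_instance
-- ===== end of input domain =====

-- B replaces A's full Pascal-triangle construction by the symmetric multiplicative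
-- formula for each C(rows,count); objective: alternative algorithm.


-- ===== PORT A =====
-- row = [1]*(n+1); for k in range(1, n): row[k] = previous[k-1] + previous[k]
-- (indices k-1, k are nonnegative here, so getD/.toNat is exact)
def pvARow (previous : List Int) (n : Int) : List Int :=
  (PySem.List.pyRange 1 n 1).foldl
    (fun row k => row.set k.toNat (previous.getD (k.toNat - 1) 0 + previous.getD k.toNat 0))
    (List.replicate (n.toNat + 1) 1)

-- rows = [(1,)]; for n in range(1, universe_size+1): rows.append(row built from rows[-1])
def pvATable (universeSize : Int) : List (List Int) :=
  (PySem.List.pyRange 1 (universeSize + 1) 1).foldl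
    (fun rows n => rows ++ [pvARow (rows.getLastD []) n]) [[1]]

-- Port of A (_support_product): guard, build the Pascal table, multiply the looked-up entries.
-- (in the multiply branch 0 ≤ count ≤ rows and the table has rows+1 rows, so both
-- indices are nonnegative and in range; getD with .toNat is exact there)
def support_product_py (rows : Int) (counts : List Int) : Int :=
  if rows < 0 || counts.any (fun count => decide (count < 0) || decide (count > rows)) then 0
  else
    let table := pvATable rows
    counts.foldl (fun support count => support * ((table.getD rows.toNat []).getD count.toNat 0)) 1

-- ===== PORT B =====
-- k = min(count, rows - count); c = 1; for i in range(1, k+1): c = c*(rows-k+i)//i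
def pvAltBinom (rows count : Int) : Int :=
  let k := if count ≤ rows - count then count else rows - count
  (PySem.List.pyRange 1 (k + 1) 1).foldl
    (fun c i => PySem.Int.floordiv (c * (rows - k + i)) i) 1

def support_product_py_alt (rows : Int) (counts : List Int) : Int :=
  if rows < 0 || counts.any (fun count => decide (count < 0) || decide (count > rows)) then 0
  else counts.foldl (fun support count => support * pvAltBinom rows count) 1

-- ===== PRECONDITION & SPEC =====
def Spec_support_product_py (rows : Int) (counts : List Int) (out : Int) : Prop := out = support_product_py_alt rows counts
instance (rows : Int) (counts : List Int) (out : Int) : Decidable (Spec_support_product_py rows counts out) := by unfold Spec_support_product_py; infer_instance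

-- ===== CLAIM (what is proved, stated in full; the proofs are below) =====
def Claim_equal_support_product_py : Prop := ∀ (rows : Int) (counts : List Int), Dom_support_product_py rows counts → Spec_support_product_py rows counts (support_product_py rows counts)

-- ===== LEMMAS AND PROOFS =====

-- the intended content of row n of the Pascal table: [C(n,0), …, C(n,n)]
def pvChooseRow (n : Nat) : List Int :=
  (List.range (n + 1)).map (fun j => (n.choose j : Int))

-- B's inner loop computes the rising product of binomials exactly (invariant: after m
-- steps the accumulator is C(a+m, m); each division is exact by Nat.add_one_mul_choose_eq)
theorem pvAltFold (a : Nat) : ∀ (m : Nat),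
    (PySem.List.pyRange 1 ((m : Int) + 1) 1).foldl
      (fun c i => PySem.Int.floordiv (c * ((a : Int) + i)) i) 1
    = ((a + m).choose m : Int) := by
  intro m
  induction m with
  | zero => simp [PySem.List.pyRange_one_eq_nil (by omega : (1:Int) ≤ 1)]
  | succ m ih =>
    rw [show ((m+1 : Nat) : Int) + 1 = ((m:Int)+1) + 1 by push_cast; ring,
        PySem.List.pyRange_one_succ_right (by omega)]
    rw [List.foldl_append]
    rw [ih]
    simp only [List.foldl]
    have key : ((a + m).choose m : Int) * ((a:Int) + ((m:Int)+1))
        = (((a + m + 1).choose (m+1) : Nat) : Int) * ((m:Int)+1) := by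
      have := Nat.add_one_mul_choose_eq (a + m) m
      push_cast at this
      nlinarith [this]
    rw [key]
    have hdiv : PySem.Int.floordiv ((((a + m + 1).choose (m+1) : Nat) : Int) * ((m:Int)+1)) ((m:Int)+1)
         = (((a + m + 1).choose (m+1) : Nat) : Int) := by
      have h2 : ((((a + m + 1).choose (m+1) : Nat) : Int) * ((m:Int)+1))
          = (((a + m + 1).choose (m+1) * (m+1) : Nat) : Int) := by push_cast; ring
      rw [h2, show ((m:Int)+1) = (((m+1 : Nat)) : Int) by push_cast; ring, PySem.Int.floordiv_natCast]
      simp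
    rw [hdiv]
    norm_cast

theorem pvAltBinom_eq (rows count : Int) (h0 : 0 ≤ count) (h1 : count ≤ rows) :
    pvAltBinom rows count = (rows.toNat.choose count.toNat : Int) := by
  show (PySem.List.pyRange 1 ((if count ≤ rows - count then count else rows - count) + 1) 1).foldl
    (fun c i => PySem.Int.floordiv
      (c * (rows - (if count ≤ rows - count then count else rows - count) + i)) i) 1 = _
  set k : Int := if count ≤ rows - count then count else rows - count with hk
  have hk0 : 0 ≤ k := by rw [hk]; split <;> omega
  have hkr : k ≤ rows := by rw [hk]; split <;> omega
  have ha : rows - k = ((rows - k).toNat : Int) := by omega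
  have hm : k + 1 = ((k.toNat : Int)) + 1 := by omega
  have step : (fun c i => PySem.Int.floordiv (c * (rows - k + i)) i)
      = (fun c i => PySem.Int.floordiv (c * (((rows - k).toNat : Int) + i)) i) := by
    funext c i; rw [← ha]
  rw [hm, step, pvAltFold]
  have hsum : (rows - k).toNat + k.toNat = rows.toNat := by omega
  rw [hsum]
  congr 1
  by_cases hc : count ≤ rows - count
  · simp only [hk, if_pos hc]
  · simp only [hk, if_neg hc]
    have : (rows - count).toNat = rows.toNat - count.toNat := by omega
    rw [this, Nat.choose_symm (by omega)]

-- the set-fold of A's inner loop preserves the list length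
theorem pvSetFold_length (v : Int → Int) (l : List Int) (L : List Int) :
    (l.foldl (fun row k => row.set k.toNat (v k)) L).length = L.length := by
  induction l generalizing L with
  | nil => rfl
  | cons x xs ih => simp [List.foldl, ih]

-- pointwise description of A's inner loop (set at positions 1..t-1)
theorem pvSetFold_get (v : Int → Int) : ∀ (t : Nat) (L : List Int), t ≤ L.length →
    ∀ (j : Nat),
    ((PySem.List.pyRange 1 (t : Int) 1).foldl (fun row k => row.set k.toNat (v k)) L)[j]?
    = if 1 ≤ j ∧ j < t then some (v j) else L[j]? := by
  intro t
  induction t with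
  | zero =>
    intro L hL j
    rw [PySem.List.pyRange_one_eq_nil (by omega)]
    have : ¬ (1 ≤ j ∧ j < 0) := by omega
    simp only [List.foldl_nil]
    rw [if_neg this]
  | succ t ih =>
    intro L hL j
    by_cases ht : t = 0
    · subst ht
      rw [show ((1:Nat) : Int) = 1 by norm_num, PySem.List.pyRange_one_eq_nil (by omega)]
      have : ¬ (1 ≤ j ∧ j < 1) := by omega
      simp only [List.foldl_nil]
      rw [if_neg this]
    · rw [show ((t+1:Nat):Int) = (t:Int)+1 by push_cast; ring,
          PySem.List.pyRange_one_succ_right (by exact_mod_cast Nat.one_le_iff_ne_zero.mpr ht)]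
      rw [List.foldl_append]
      simp only [List.foldl_cons, List.foldl_nil]
      rw [List.getElem?_set]
      rw [pvSetFold_length]
      have htj : ((t:Int)).toNat = t := by omega
      rw [htj]
      by_cases hjt : t = j
      · subst hjt
        rw [if_pos rfl, if_pos (show t < L.length by omega),
           if_pos (show 1 ≤ t ∧ t < t + 1 by omega)]
      · rw [if_neg hjt, ih L (by omega) j]
        by_cases h1 : 1 ≤ j ∧ j < t
        · rw [if_pos h1, if_pos (by omega)]
        · rw [if_neg h1, if_neg (by omega)]

-- one Pascal step: from row C(m,·) A's inner loop builds row C(m+1,·)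
theorem pvARow_eq (m : Nat) :
    pvARow (pvChooseRow m) ((m : Int) + 1) = pvChooseRow (m + 1) := by
  unfold pvARow
  have hn : ((m : Int) + 1) = ((m + 1 : Nat) : Int) := by push_cast; ring
  have hln : (((m + 1 : Nat) : Int)).toNat = m + 1 := by omega
  rw [hn, hln]
  apply List.ext_getElem?
  intro j
  rw [pvSetFold_get _ (m+1) _ (by simp)]
  by_cases h1 : 1 ≤ j ∧ j < m + 1
  · rw [if_pos h1]
    have h2 : (↑j : Int).toNat = j := by omega
    rw [h2]
    rw [List.getD_eq_getElem?_getD, List.getD_eq_getElem?_getD]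
    simp only [pvChooseRow, List.getElem?_map, List.getElem?_range (show j - 1 < m + 1 by omega),
      List.getElem?_range (show j < m + 1 by omega), Option.map_some, Option.getD_some]
    rw [List.getElem?_range (show j < m + 2 by omega), Option.map_some]
    have hj : j = (j - 1) + 1 := by omega
    congr 1
    rw [hj, Nat.choose_succ_succ]
    push_cast
    ring
  · rw [if_neg h1]
    simp only [pvChooseRow, List.getElem?_map, List.getElem?_replicate]
    by_cases hj2 : j < m + 2
    · rw [if_pos hj2, List.getElem?_range hj2, Option.map_some]
      have : j = 0 ∨ j = m + 1 := by omega
      rcases this with h | h <;> subst h <;> simp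
    · rw [if_neg hj2, List.getElem?_eq_none (by simpa using by omega)]
      simp

-- the whole table A builds is [C(0,·), …, C(u,·)]
theorem pvATable_eq (u : Nat) :
    pvATable (u : Int) = (List.range (u + 1)).map pvChooseRow := by
  induction u with
  | zero =>
    simp [pvATable, pvChooseRow, List.range_succ]
  | succ u ih =>
    unfold pvATable
    rw [show ((u + 1 : Nat) : Int) + 1 = ((u:Int) + 1) + 1 by push_cast; ring,
      PySem.List.pyRange_one_succ_right (by omega), List.foldl_append]
    simp only [List.foldl_cons, List.foldl_nil]
    unfold pvATable at ih
    rw [ih]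
    have hlast : (((List.range (u + 1)).map pvChooseRow).getLastD []) = pvChooseRow u := by
      rw [List.range_succ, List.map_append]
      simp
    rw [hlast, pvARow_eq u]
    rw [show List.range (u + 1 + 1) = List.range (u + 1) ++ [u + 1] from List.range_succ,
      List.map_append]
    simp

-- ===== VERDICT (by name: the statement is the Claim_ definition above) =====
theorem support_product_py_spec : Claim_equal_support_product_py := by
  intro rows counts _
  unfold Spec_support_product_py support_product_py support_product_py_alt
  by_cases hg : (rows < 0 || counts.any (fun count => decide (count < 0) || decide (count > rows))) = true
  · rw [if_pos hg, if_pos hg]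
  · rw [if_neg hg, if_neg hg]
    have hrows : 0 ≤ rows := by
      by_contra h
      simp only [Bool.or_eq_true, decide_eq_true_eq] at hg
      exact hg (Or.inl (by omega))
    have hcounts : ∀ c ∈ counts, 0 ≤ c ∧ c ≤ rows := by
      intro c hc
      simp only [Bool.or_eq_true, decide_eq_true_eq, List.any_eq_true, not_or, not_exists,
        not_and] at hg
      have := hg.2 c hc
      omega
    have hcast : rows = ((rows.toNat : Nat) : Int) := by omega
    have htab : pvATable rows = (List.range (rows.toNat + 1)).map pvChooseRow := by
      rw [hcast]; exact pvATable_eq rows.toNat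
    apply PySem.List.foldl_congr_mem
    intro acc c hc
    obtain ⟨hc0, hc1⟩ := hcounts c hc
    congr 1
    rw [htab, PySem.List.getD_map_range _ _ _ _ (show rows.toNat < rows.toNat + 1 by omega)]
    rw [pvChooseRow, PySem.List.getD_map_range _ _ _ _ (show c.toNat < rows.toNat + 1 by omega)]
    rw [pvAltBinom_eq rows c hc0 hc1]
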